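-- pv_equiv track=rewrite | github.com/deferredreward/unfoldingword-scripts-to-work-with-data | alignments from usfm multithreading write index.py | sortByVerse
-- ===== SOURCE A (Python) =====
-- def sortByVerse(possibleTranslations):
--     possibleTranslationsByRef = {}
--     for k, v in possibleTranslations.items():
--         for x in v:
--             possibleTranslationsByRef.setdefault(x,[]).append(k)
--     sorted_items = {key: value for key, value in sorted(possibleTranslationsByRef.items())}
--     sortedPossibleTranslations = dict(sorted_items)
--     return sortedPossibleTranslations
-- ===== SOURCE B (Python) =====
-- def sortByVerse(possibleTranslations):
--     pairs = [(x, k) for k, v in possibleTranslations.items() for x in v]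
--     pairs.sort(key=lambda p: p[0])
--     sortedPossibleTranslations = {}
--     for x, k in pairs:
--         sortedPossibleTranslations.setdefault(x, []).append(k)
--     return sortedPossibleTranslations
-- ===== Notes on version B (the rewrite author's own statement) =====
-- stated objective: alternative
-- what changed: A groups first (reverse-index dict via setdefault) and then sorts the dict's items; B flattens the input to (target, key) pairs, stably sorts the flat pair list by target once, and builds the result dict in a single grouping walk over the sorted pairs, so no sort of dict items and no second dict rebuild is needed.
import Mathlib
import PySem

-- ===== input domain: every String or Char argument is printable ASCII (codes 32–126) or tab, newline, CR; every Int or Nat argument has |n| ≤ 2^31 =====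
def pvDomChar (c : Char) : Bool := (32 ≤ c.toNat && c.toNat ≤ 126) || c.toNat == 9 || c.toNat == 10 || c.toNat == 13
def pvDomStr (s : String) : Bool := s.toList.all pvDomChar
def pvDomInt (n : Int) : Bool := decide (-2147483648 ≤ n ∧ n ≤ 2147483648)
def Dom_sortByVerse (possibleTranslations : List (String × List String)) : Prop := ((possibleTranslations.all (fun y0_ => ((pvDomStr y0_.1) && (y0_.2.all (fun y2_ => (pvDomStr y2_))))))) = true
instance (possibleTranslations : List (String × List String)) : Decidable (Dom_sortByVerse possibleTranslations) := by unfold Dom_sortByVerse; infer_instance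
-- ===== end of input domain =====

-- B replaces A's group-then-sort (setdefault dict, then sort the dict's items and rebuild a dict)
-- with sort-then-group: flatten to (target, key) pairs, stably sort them by target once, and build
-- the result dict in one grouping walk. Objective: alternative decomposition of the same cost.

-- ===== PORT A =====
-- setdefault(x,[]).append(k) has the net effect d[x] = d.get(x, []) + [k] (key position = first
-- insertion), i.e. Dict.modify x [] (· ++ [k]).
-- sorted(d.items()) compares (key, value) tuples; the dict's keys are pairwise distinct, so the
-- value component is never compared and the sort is exactly the stable sort by the key component.
-- The final dict(sorted_items) is a plain copy of the comprehension's dict (identity on its items).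
def sortByVerse (possibleTranslations : List (String × List String)) : List (String × List String) :=
  let possibleTranslationsByRef : PySem.Dict String (List String) :=
    possibleTranslations.foldl
      (fun d kv => kv.2.foldl (fun d x => d.modify x [] (fun l => l ++ [kv.1])) d)
      PySem.Dict.empty
  let sorted_items : PySem.Dict String (List String) :=
    (PySem.List.sorted possibleTranslationsByRef.items (fun p => p.1)).foldl
      (fun d kv => d.insert kv.1 kv.2) PySem.Dict.empty
  let sortedPossibleTranslations := sorted_items
  sortedPossibleTranslations.items

-- ===== PORT B =====
-- pairs = [(x, k) …]; pairs.sort(key=fst) (stable); then one setdefault-append grouping walk.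
def sortByVerse_alt (possibleTranslations : List (String × List String)) : List (String × List String) :=
  let pairs : List (String × String) :=
    possibleTranslations.flatMap (fun kv => kv.2.map (fun x => (x, kv.1)))
  let sortedPairs := PySem.List.sorted pairs (fun p => p.1)
  (sortedPairs.foldl (fun d p => d.modify p.1 [] (fun l => l ++ [p.2])) PySem.Dict.empty).items

-- ===== PRECONDITION & SPEC =====
def Spec_sortByVerse (possibleTranslations : List (String × List String)) (out : List (String × List String)) : Prop := out = sortByVerse_alt possibleTranslations
instance (possibleTranslations : List (String × List String)) (out : List (String × List String)) : Decidable (Spec_sortByVerse possibleTranslations out) := by unfold Spec_sortByVerse; infer_instance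

-- ===== CLAIM (what is proved, stated in full; the proofs are below) =====
def Claim_equal_sortByVerse : Prop := ∀ (possibleTranslations : List (String × List String)), Dom_sortByVerse possibleTranslations → Spec_sortByVerse possibleTranslations (sortByVerse possibleTranslations)

-- ===== LEMMAS AND PROOFS =====

-- getD of the modify-append fold: collects the second components of matching pairs, in order.
theorem getD_foldl_modify_append (l : List (String × String)) (d : PySem.Dict String (List String)) (x : String) :
    (l.foldl (fun d p => d.modify p.1 [] (fun acc => acc ++ [p.2])) d).getD x []
      = d.getD x [] ++ (l.filter (fun p => p.1 == x)).map (fun p => p.2) := by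
  induction l generalizing d with
  | nil => simp
  | cons p t ih =>
    simp only [List.foldl_cons, ih, List.filter_cons]
    by_cases h : p.1 = x
    · subst h
      simp [PySem.Dict.getD_modify_self]
    · simp [PySem.Dict.getD_modify_of_ne _ _ _ (fun hx => h hx.symm), beq_iff_eq, h]

-- items of an insert fold from a dict containing none of the inserted (pairwise distinct) keys.
theorem items_foldl_insert_fresh (ys : List (String × List String)) (d : PySem.Dict String (List String))
    (hfresh : ∀ p ∈ ys, d.contains p.1 = false) (hnd : (ys.map Prod.fst).Nodup) :
    (ys.foldl (fun d kv => d.insert kv.1 kv.2) d).items = d.items ++ ys := by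
  induction ys generalizing d with
  | nil => simp
  | cons p t ih =>
    simp only [List.foldl_cons]
    rw [ih]
    · rw [PySem.Dict.items_insert_of_not_contains _ _ (hfresh p (by simp))]
      simp
    · intro q hq
      rw [PySem.Dict.contains_insert]
      simp only [List.map_cons, List.nodup_cons, List.mem_map] at hnd
      have h1 : q.1 ≠ p.1 := fun h => hnd.1 ⟨q, hq, h⟩
      simp [hfresh q (List.mem_cons_of_mem _ hq), h1]
    · simp only [List.map_cons, List.nodup_cons] at hnd
      exact hnd.2

-- the ordered dedup Set.ofList is a sublist of its argument.
theorem ofList_sublist {α : Type} [BEq α] [LawfulBEq α] (l : List α) :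
    (PySem.Set.ofList l).Sublist l := by
  induction l with
  | nil => simp [PySem.Set.ofList]
  | cons x xs ih =>
    rw [PySem.Set.ofList_cons]
    have h1 : (PySem.Set.discard (PySem.Set.ofList xs) x).Sublist (PySem.Set.ofList xs) :=
      List.filter_sublist
    exact List.Sublist.cons₂ x (h1.trans ih)

-- STABILITY at one key class: inserting into a key-sorted accumulator puts x after every element
-- of its own class, so the class is extended at the back.
theorem filter_insertBy_class {α : Type} (key : α → String) (c : String) (x : α) (ys : List α)
    (hys : ys.Pairwise (fun a b => key a ≤ key b)) :
    (PySem.List.insertBy (fun a b => decide (key a < key b)) x ys).filter (fun a => key a == c)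
      = if key x = c then ys.filter (fun a => key a == c) ++ [x]
        else ys.filter (fun a => key a == c) := by
  induction ys with
  | nil =>
    by_cases h : key x = c <;> simp [PySem.List.insertBy, h]
  | cons y ys ih =>
    rw [List.pairwise_cons] at hys
    show (if decide (key x < key y) = true then x :: y :: ys
          else y :: PySem.List.insertBy (fun a b => decide (key a < key b)) x ys).filter
            (fun a => key a == c) = _
    by_cases hlt : key x < key y
    · rw [if_pos (by simp [hlt])]
      by_cases hc : key x = c
      · have hempty : (y :: ys).filter (fun a => key a == c) = [] := by
          rw [List.filter_eq_nil_iff]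
          intro a ha
          have hya : key y ≤ key a := by
            rcases List.mem_cons.mp ha with h | h
            · exact h ▸ le_refl _
            · exact hys.1 a h
          have hca : c < key a := by rw [← hc]; exact hlt.trans_le hya
          simp only [beq_iff_eq]
          exact fun hac => absurd (hac ▸ hca) (lt_irrefl _)
        rw [List.filter_cons]
        simp only [hc, beq_self_eq_true, if_pos, hempty]
        simp
      · rw [List.filter_cons]
        simp [hc]
    · rw [if_neg (by simp [hlt])]
      have hrec := ih hys.2
      rw [List.filter_cons, List.filter_cons, hrec]
      by_cases hc : key x = c <;> by_cases hyc : key y = c <;> simp [hc, hyc]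

-- stability of the whole sort at one key class.
theorem filter_sorted_class {α : Type} (key : α → String) (c : String) (xs : List α) :
    (PySem.List.sorted xs key).filter (fun a => key a == c) = xs.filter (fun a => key a == c) := by
  rw [PySem.List.sorted_eq_foldl_insertBy]
  suffices h : ∀ (acc : List α), acc.Pairwise (fun a b => key a ≤ key b) →
      (xs.foldl (fun acc x => PySem.List.insertBy (fun a b => decide (key a < key b)) x acc) acc).filter
          (fun a => key a == c)
        = acc.filter (fun a => key a == c) ++ xs.filter (fun a => key a == c) by
    simpa using h [] List.Pairwise.nil
  induction xs with
  | nil => simp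
  | cons x t ih =>
    intro acc hacc
    simp only [List.foldl_cons]
    rw [ih _ (PySem.List.insertBy_pairwise_le key x acc hacc),
      filter_insertBy_class key c x acc hacc, List.filter_cons]
    by_cases hc : key x = c <;> simp [hc]

theorem sortByVerse_eq (pt : List (String × List String)) :
    sortByVerse pt = sortByVerse_alt pt := by
  unfold sortByVerse sortByVerse_alt
  set pairs : List (String × String) := pt.flatMap (fun kv => kv.2.map (fun x => (x, kv.1))) with hpairs
  -- A's nested loop is the single loop over the flattened (target, key) pairs
  have hflat :
      pt.foldl (fun d kv => kv.2.foldl (fun d x => d.modify x [] (fun l => l ++ [kv.1])) d)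
          (PySem.Dict.empty : PySem.Dict String (List String))
        = pairs.foldl (fun d p => d.modify p.1 [] (fun acc => acc ++ [p.2])) PySem.Dict.empty := by
    rw [hpairs, List.foldl_flatMap]
    simp only [List.foldl_map]
  simp only [hflat]
  set d : PySem.Dict String (List String) :=
    pairs.foldl (fun d p => d.modify p.1 [] (fun acc => acc ++ [p.2])) PySem.Dict.empty with hd
  set sp : List (String × String) := PySem.List.sorted pairs (fun p => p.1) with hsp
  set d' : PySem.Dict String (List String) :=
    sp.foldl (fun d p => d.modify p.1 [] (fun acc => acc ++ [p.2])) PySem.Dict.empty with hd'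
  have hkeys : ∀ (l : List (String × String)),
      (l.foldl (fun d p => d.modify p.1 [] (fun acc => acc ++ [p.2]))
        (PySem.Dict.empty : PySem.Dict String (List String))).keys
        = PySem.Set.ofList (l.map Prod.fst) := by
    intro l
    rw [PySem.Dict.keys_foldl_modify_key l Prod.fst [] (fun _ p acc => acc ++ [p.2]),
      PySem.Set.ofList_eq_foldl]
    rfl
  have hgetD : ∀ (l : List (String × String)) (x : String),
      (l.foldl (fun d p => d.modify p.1 [] (fun acc => acc ++ [p.2]))
        (PySem.Dict.empty : PySem.Dict String (List String))).getD x []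
        = (l.filter (fun p => p.1 == x)).map (fun p => p.2) := by
    intro l x
    rw [getD_foldl_modify_append, PySem.Dict.getD_empty, List.nil_append]
  have hnd : d.keys.Nodup := by rw [hd, hkeys]; exact PySem.Set.nodup_ofList _
  have hnd' : d'.keys.Nodup := by rw [hd', hkeys]; exact PySem.Set.nodup_ofList _
  -- the sorted distinct targets
  set targets : List String := PySem.List.sorted (PySem.Set.ofList (pairs.map Prod.fst)) (fun x => x)
    with htg
  have htg_lt : targets.Pairwise (fun a b => a < b) := by
    rw [htg]; exact PySem.List.sorted_ofList_pairwise_lt _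
  -- B's key list is exactly the sorted distinct targets
  have hkeysB : d'.keys = targets := by
    rw [hd', hkeys, htg]
    symm
    apply PySem.List.sorted_eq_of_perm_of_pairwise_lt
    · rw [List.perm_ext_iff_of_nodup (PySem.Set.nodup_ofList _) (PySem.Set.nodup_ofList _)]
      intro a
      rw [PySem.Set.mem_ofList, PySem.Set.mem_ofList]
      exact List.Perm.mem_iff (List.Perm.map _ (PySem.List.sorted_perm _ _ _))
    · have hle : (sp.map Prod.fst).Pairwise (fun a b => a ≤ b) := by
        rw [hsp]; exact PySem.List.sorted_map_key_pairwise _ _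
      have hsub := ofList_sublist (sp.map Prod.fst)
      exact ((hle.sublist hsub).and (PySem.Set.nodup_ofList _)).imp
        (fun h => lt_of_le_of_ne h.1 h.2)
  -- both sides as a map over targets
  have hB : d'.items = targets.map (fun k => (k, (pairs.filter (fun p => p.1 == k)).map (fun p => p.2))) := by
    rw [PySem.Dict.items_eq_map_keys d' hnd' [], hkeysB]
    apply List.map_congr_left
    intro k _
    rw [hd', hgetD, hsp, filter_sorted_class (fun p : String × String => p.1) k pairs]
  set ys : List (String × List String) :=
    targets.map (fun k => (k, (pairs.filter (fun p => p.1 == k)).map (fun p => p.2))) with hys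
  have hys_fst : ys.map Prod.fst = targets := by
    rw [hys, List.map_map]; simp [Function.comp_def]
  have hsorted : PySem.List.sorted d.items (fun p => p.1) = ys := by
    apply PySem.List.sorted_eq_of_perm_of_pairwise_lt
    · rw [PySem.Dict.items_eq_map_keys d hnd [], hd, hkeys, ← hd]
      have : ys = targets.map (fun k => (k, d.getD k [])) := by
        rw [hys]
        apply List.map_congr_left
        intro k _
        rw [hd, hgetD]
      rw [this, htg]
      exact List.Perm.map _ (PySem.List.sorted_perm _ _ _)
    · rw [hys]
      exact List.Pairwise.map _ (fun a b h => h) htg_lt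
  rw [hsorted, hB]
  have htnd : (ys.map Prod.fst).Nodup := by
    rw [hys_fst]
    exact htg_lt.nodup
  rw [items_foldl_insert_fresh ys PySem.Dict.empty (fun p _ => rfl) htnd]
  rfl

-- ===== VERDICT (by name: the statement is the Claim_ definition above) =====
theorem sortByVerse_spec : Claim_equal_sortByVerse := by
  intro pt _
  unfold Spec_sortByVerse
  exact sortByVerse_eq pt
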